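-- pv_equiv track=rewrite | github.com/PFrek/static-site-generator | src/block_markdown.py | check_heading_start
-- ===== SOURCE A (Python) =====
-- def check_line_start(line, symbol):
--     if len(symbol) > len(line):
--         return False
--
--     for i in range(len(symbol)):
--         if line[i] != symbol[i]:
--             return False
--
--     return True
--
-- def check_heading_start(line):
--     is_heading = False
--
--     for i in range(1, 7):
--         heading_start = "#" * i + " "
--
--         if check_line_start(line, heading_start):
--             is_heading = True
--             break
--
--     return is_heading
-- ===== SOURCE B (Python) =====
-- def check_heading_start(line):
--     count = 0
--     while count < len(line) and line[count] == '#':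
--         count += 1
--     return 1 <= count <= 6 and count < len(line) and line[count] == ' '
-- ===== Notes on version B (the rewrite author's own statement) =====
-- stated objective: idiomatic
-- what changed: Instead of building each candidate prefix '#'*i+' ' for i=1..6 and testing it character-by-character, B counts the leading run of '#' in one pass and checks 1<=count<=6 and that the next character is a space.
import Mathlib
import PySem

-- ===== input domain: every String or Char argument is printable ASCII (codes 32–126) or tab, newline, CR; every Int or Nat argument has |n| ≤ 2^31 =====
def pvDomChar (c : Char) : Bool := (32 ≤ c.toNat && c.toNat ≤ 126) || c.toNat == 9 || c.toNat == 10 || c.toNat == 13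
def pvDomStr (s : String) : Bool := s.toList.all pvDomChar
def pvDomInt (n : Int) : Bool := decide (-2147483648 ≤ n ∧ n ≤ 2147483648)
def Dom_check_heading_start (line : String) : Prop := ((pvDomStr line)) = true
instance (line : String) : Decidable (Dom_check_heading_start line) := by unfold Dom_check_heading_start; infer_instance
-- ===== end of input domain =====

-- B counts the leading run of '#' in one pass and validates the count and following space,
-- instead of A's trying each candidate prefix "#"*i + " " for i = 1..6 (idiomatic decomposition; return value only, no side effects).

-- ===== PORT A =====
-- for i in range(len(symbol)): if line[i] != symbol[i]: return False
def clsLoop (l s : List Char) : List Nat → Bool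
  | [] => true
  | i :: rest =>
    if PySem.List.pyGet? l (i : Int) ≠ PySem.List.pyGet? s (i : Int) then false
    else clsLoop l s rest

def check_line_start (l s : List Char) : Bool :=
  if s.length > l.length then false
  else clsLoop l s (List.range s.length)

-- for i in range(1, 7): if check_line_start(line, "#"*i + " "): is_heading = True; break
def chsLoop (l : List Char) : List Nat → Bool
  | [] => false
  | i :: rest =>
    if check_line_start l (List.replicate i '#' ++ [' ']) then true
    else chsLoop l rest

def check_heading_start (line : String) : Bool :=
  chsLoop line.toList [1, 2, 3, 4, 5, 6]

-- ===== PORT B =====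
-- while count < len(line) and line[count] == '#': count += 1
def countHashes : List Char → Nat
  | [] => 0
  | c :: rest => if c = '#' then countHashes rest + 1 else 0

def check_heading_start_alt (line : String) : Bool :=
  let c := countHashes line.toList
  decide (1 ≤ c) && decide (c ≤ 6) && (line.toList[c]? == some ' ')

-- ===== PRECONDITION & SPEC =====
def Spec_check_heading_start (line : String) (out : Bool) : Prop := out = check_heading_start_alt line
instance (line : String) (out : Bool) : Decidable (Spec_check_heading_start line out) := by unfold Spec_check_heading_start; infer_instance

-- ===== CLAIM (what is proved, stated in full; the proofs are below) =====
def Claim_equal_check_heading_start : Prop := ∀ (line : String), Dom_check_heading_start line → Spec_check_heading_start line (check_heading_start line)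

-- ===== LEMMAS AND PROOFS =====

theorem clsLoop_append (l s : List Char) (xs ys : List Nat) :
    clsLoop l s (xs ++ ys) = (clsLoop l s xs && clsLoop l s ys) := by
  induction xs with
  | nil => simp [clsLoop]
  | cons i rest ih => by_cases h : PySem.List.pyGet? l (i : Int) = PySem.List.pyGet? s (i : Int) <;>
      simp [clsLoop, h, ih, Bool.and_assoc]

theorem clsLoop_range_iff (l s : List Char) (n : Nat) :
    clsLoop l s (List.range n) = true ↔ ∀ i < n, l[i]? = s[i]? := by
  induction n with
  | zero => simp [clsLoop]
  | succ n ih =>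
    rw [List.range_succ, clsLoop_append]
    simp only [Bool.and_eq_true, ih, clsLoop, PySem.List.pyGet?_natCast]
    constructor
    · rintro ⟨h1, h2⟩ i hi
      rcases Nat.lt_succ_iff_lt_or_eq.mp hi with h | h
      · exact h1 i h
      · subst h; by_contra hc; simp [hc] at h2
    · intro h
      refine ⟨fun i hi => h i (Nat.lt_succ_of_lt hi), ?_⟩
      simp [h n (Nat.lt_succ_self n)]

theorem cls_iff (l s : List Char) :
    check_line_start l s = true ↔ s <+: l := by
  unfold check_line_start
  by_cases hlen : s.length > l.length
  · simp only [hlen, if_true]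
    constructor
    · intro h; cases h
    · intro h; exact absurd (List.IsPrefix.length_le h) (by omega)
  · simp only [hlen, if_false]
    rw [clsLoop_range_iff]
    constructor
    · intro h
      rw [List.prefix_iff_eq_take]
      apply List.ext_getElem?
      intro i
      rcases Nat.lt_or_ge i s.length with hi | hi
      · rw [List.getElem?_take_of_lt hi, h i hi]
      · rw [List.getElem?_eq_none hi, List.getElem?_eq_none (by simp; omega)]
    · intro h i hi
      obtain ⟨t, ht⟩ := h
      subst ht
      rw [List.getElem?_append_left hi]

theorem take_countHashes (l : List Char) :
    l.take (countHashes l) = List.replicate (countHashes l) '#' := by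
  induction l with
  | nil => simp [countHashes]
  | cons c rest ih =>
    by_cases h : c = '#'
    · simp [countHashes, h, List.replicate_succ, ih]
    · simp [countHashes, h]

theorem countHashes_append_replicate (i : Nat) (t : List Char) :
    countHashes (List.replicate i '#' ++ ' ' :: t) = i := by
  induction i with
  | zero => simp [countHashes]
  | succ n ih => simp [List.replicate_succ, countHashes, ih]

theorem alt_iff (l : List Char) :
    (decide (1 ≤ countHashes l) && decide (countHashes l ≤ 6) && (l[countHashes l]? == some ' ')) = true
      ↔ ∃ i, 1 ≤ i ∧ i ≤ 6 ∧ (List.replicate i '#' ++ [' ']) <+: l := by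
  constructor
  · rintro h
    simp only [Bool.and_eq_true, decide_eq_true_eq, beq_iff_eq] at h
    obtain ⟨⟨h1, h2⟩, hsp⟩ := h
    refine ⟨countHashes l, h1, h2, ?_⟩
    rw [List.prefix_iff_eq_take]
    have : l.take (countHashes l + 1) = l.take (countHashes l) ++ l[countHashes l]?.toList :=
      List.take_add_one
    simp only [List.length_append, List.length_replicate, List.length_cons, List.length_nil]
    rw [this, take_countHashes, hsp]
    rfl
  · rintro ⟨i, h1, h2, t, ht⟩
    have hl : l = List.replicate i '#' ++ ' ' :: t := by
      rw [← ht]; simp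
    have hc : countHashes l = i := by rw [hl]; exact countHashes_append_replicate i t
    simp only [Bool.and_eq_true, decide_eq_true_eq, beq_iff_eq, hc]
    refine ⟨⟨h1, h2⟩, ?_⟩
    rw [hl]
    rw [show i = (List.replicate i '#').length by simp]
    simp

theorem a_iff (l : List Char) :
    chsLoop l [1, 2, 3, 4, 5, 6] = true ↔ ∃ i, 1 ≤ i ∧ i ≤ 6 ∧ (List.replicate i '#' ++ [' ']) <+: l := by
  simp only [chsLoop]
  constructor
  · intro h
    split_ifs at h with h1 h2 h3 h4 h5 h6
    · exact ⟨1, by norm_num, by norm_num, (cls_iff _ _).mp h1⟩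
    · exact ⟨2, by norm_num, by norm_num, (cls_iff _ _).mp h2⟩
    · exact ⟨3, by norm_num, by norm_num, (cls_iff _ _).mp h3⟩
    · exact ⟨4, by norm_num, by norm_num, (cls_iff _ _).mp h4⟩
    · exact ⟨5, by norm_num, by norm_num, (cls_iff _ _).mp h5⟩
    · exact ⟨6, by norm_num, by norm_num, (cls_iff _ _).mp h6⟩
  · rintro ⟨i, h1, h2, hp⟩
    interval_cases i <;>
      · have := (cls_iff l _).mpr hp
        split_ifs <;> simp_all

-- ===== VERDICT (by name: the statement is the Claim_ definition above) =====
theorem check_heading_start_spec : Claim_equal_check_heading_start := by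
  intro line _
  unfold Spec_check_heading_start check_heading_start check_heading_start_alt
  rw [Bool.eq_iff_iff, a_iff, ← alt_iff]
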